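-- pv_equiv track=rewrite | github.com/ananydoneria/syngen | prompt_parser/parser.py | _build_priority_rules
-- ===== SOURCE A (Python) =====
-- from typing import Any
--
-- def _build_priority_rules(filters: dict[str, dict[str, Any]]) -> list[str]:
--     hard = []
--     soft = []
--     for col, data in filters.items():
--         if data["type"] == "range":
--             hard.append(f"{col}:range")
--         elif data["type"] == "exact":
--             hard.append(f"{col}:exact")
--         else:
--             soft.append(f"{col}:{data['type']}")
--     return hard + soft
-- ===== SOURCE B (Python) =====
-- def _build_priority_rules(filters: dict[str, dict[str, str]]) -> list[str]:
--     # Single pass, single output list: hard rules are inserted at a moving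
--     # boundary index, soft rules are appended after it.
--     rules = []
--     boundary = 0
--     for col, data in filters.items():
--         rule = f"{col}:{data['type']}"
--         if data["type"] in ("range", "exact"):
--             rules.insert(boundary, rule)
--             boundary += 1
--         else:
--             rules.append(rule)
--     return rules
-- ===== Notes on version B (the rewrite author's own statement) =====
-- stated objective: alternative
-- what changed: Instead of maintaining two separate lists (hard, soft) and concatenating them at the end, B keeps one output list with a moving boundary index: hard rules are inserted at the boundary, soft rules appended at the end, and the hard branches are unified into one f-string since col:range / col:exact equal col:type.
import Mathlib
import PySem

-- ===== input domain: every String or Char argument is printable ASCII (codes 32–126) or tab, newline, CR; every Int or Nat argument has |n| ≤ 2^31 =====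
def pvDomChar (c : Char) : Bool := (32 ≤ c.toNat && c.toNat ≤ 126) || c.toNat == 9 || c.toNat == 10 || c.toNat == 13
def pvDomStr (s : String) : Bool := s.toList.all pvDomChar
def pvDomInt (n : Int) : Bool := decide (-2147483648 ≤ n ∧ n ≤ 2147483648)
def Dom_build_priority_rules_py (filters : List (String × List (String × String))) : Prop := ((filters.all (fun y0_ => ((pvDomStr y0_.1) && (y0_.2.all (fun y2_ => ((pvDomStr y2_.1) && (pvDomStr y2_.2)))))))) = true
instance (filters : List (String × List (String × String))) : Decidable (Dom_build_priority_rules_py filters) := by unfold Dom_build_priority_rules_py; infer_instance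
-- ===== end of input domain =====

-- B replaces A's two accumulator lists joined at the end by one output list with a
-- moving boundary index (hard rules inserted at the boundary, soft rules appended);
-- objective: alternative decomposition, same cost on realistic inputs.

-- ===== PORT A =====
-- data["type"] : first-match lookup in the inner dict; total form (getD "") is
-- faithful under Pre_, which requires the "type" key to be present (else Python raises KeyError).
def build_priority_rules_py (filters : List (String × List (String × String))) : List String :=
  let p := filters.foldl (fun (acc : List String × List String) cd =>
    let col := cd.1
    let t := (PySem.Dict.mk cd.2).getD "type" ""
    if t = "range" then (acc.1 ++ [col ++ ":range"], acc.2)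
    else if t = "exact" then (acc.1 ++ [col ++ ":exact"], acc.2)
    else (acc.1, acc.2 ++ [col ++ ":" ++ t])) ([], [])
  p.1 ++ p.2

-- ===== PORT B =====
def build_priority_rules_py_alt (filters : List (String × List (String × String))) : List String :=
  let p := filters.foldl (fun (acc : List String × Nat) cd =>
    let col := cd.1
    let t := (PySem.Dict.mk cd.2).getD "type" ""
    let rule := col ++ ":" ++ t
    if t = "range" ∨ t = "exact" then (PySem.List.insert acc.1 (acc.2 : Int) rule, acc.2 + 1)
    else (acc.1 ++ [rule], acc.2)) ([], 0)
  p.1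

-- ===== PRECONDITION & SPEC =====
-- Pre_ excludes inner dicts missing the "type" key, on which both Pythons raise KeyError.
def Pre_build_priority_rules_py (filters : List (String × List (String × String))) : Prop :=
  ∀ p ∈ filters, p.2.any (fun kv => kv.1 == "type") = true
instance (filters : List (String × List (String × String))) : Decidable (Pre_build_priority_rules_py filters) := by unfold Pre_build_priority_rules_py; infer_instance
def pvWitness_build_priority_rules_py : (List (String × List (String × String))) :=
  [("a", [("type", "range")]), ("b", [("type", "fuzzy")])]

def Spec_build_priority_rules_py (filters : List (String × List (String × String))) (out : List String) : Prop := out = build_priority_rules_py_alt filters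
instance (filters : List (String × List (String × String))) (out : List String) : Decidable (Spec_build_priority_rules_py filters out) := by unfold Spec_build_priority_rules_py; infer_instance

-- ===== CLAIM (what is proved, stated in full; the proofs are below) =====
def Claim_equal_build_priority_rules_py : Prop := ∀ (filters : List (String × List (String × String))), Dom_build_priority_rules_py filters → Pre_build_priority_rules_py filters → Spec_build_priority_rules_py filters (build_priority_rules_py filters)

-- ===== LEMMAS AND PROOFS =====

-- Loop invariant: B's single list with boundary = A's (hard, soft) pair, with the
-- boundary index equal to hard's length.
theorem pv_loop_eq (fs : List (String × List (String × String))) (hard soft : List String) :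
    fs.foldl (fun (acc : List String × Nat) cd =>
      let col := cd.1
      let t := (PySem.Dict.mk cd.2).getD "type" ""
      let rule := col ++ ":" ++ t
      if t = "range" ∨ t = "exact" then (PySem.List.insert acc.1 (acc.2 : Int) rule, acc.2 + 1)
      else (acc.1 ++ [rule], acc.2)) (hard ++ soft, hard.length)
    = (let p := fs.foldl (fun (acc : List String × List String) cd =>
        let col := cd.1
        let t := (PySem.Dict.mk cd.2).getD "type" ""
        if t = "range" then (acc.1 ++ [col ++ ":range"], acc.2)
        else if t = "exact" then (acc.1 ++ [col ++ ":exact"], acc.2)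
        else (acc.1, acc.2 ++ [col ++ ":" ++ t])) (hard, soft)
       (p.1 ++ p.2, p.1.length)) := by
  induction fs generalizing hard soft with
  | nil => simp
  | cons cd rest ih =>
    simp only [List.foldl_cons]
    by_cases h1 : (PySem.Dict.mk cd.2).getD "type" "" = "range"
    · have hins : PySem.List.insert (hard ++ soft) ((hard.length : Nat) : Int)
          (cd.1 ++ ":" ++ "range") = hard ++ (cd.1 ++ ":range") :: soft := by
        rw [PySem.List.insert_natCast _ _ _ (by simp)]
        simp only [List.take_left, List.drop_left]
        congr 2
        rw [String.append_assoc, show (":" : String) ++ "range" = ":range" from by decide]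
      simp only [h1]
      rw [hins]
      have := ih (hard ++ [cd.1 ++ ":range"]) soft
      simpa using this
    · by_cases h2 : (PySem.Dict.mk cd.2).getD "type" "" = "exact"
      · have hins : PySem.List.insert (hard ++ soft) ((hard.length : Nat) : Int)
            (cd.1 ++ ":" ++ "exact") = hard ++ (cd.1 ++ ":exact") :: soft := by
          rw [PySem.List.insert_natCast _ _ _ (by simp)]
          simp only [List.take_left, List.drop_left]
          congr 2
          rw [String.append_assoc, show (":" : String) ++ "exact" = ":exact" from by decide]
        simp only [h2]
        rw [hins]
        have := ih (hard ++ [cd.1 ++ ":exact"]) soft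
        simpa using this
      · simp only [if_neg h1, if_neg h2,
          if_neg (by tauto : ¬((PySem.Dict.mk cd.2).getD "type" "" = "range" ∨ (PySem.Dict.mk cd.2).getD "type" "" = "exact"))]
        have := ih hard (soft ++ [cd.1 ++ ":" ++ (PySem.Dict.mk cd.2).getD "type" ""])
        simpa using this

-- ===== VERDICT (by name: the statement is the Claim_ definition above) =====
theorem build_priority_rules_py_spec : Claim_equal_build_priority_rules_py := by
  intro filters _ _
  unfold Spec_build_priority_rules_py build_priority_rules_py build_priority_rules_py_alt
  have := pv_loop_eq filters [] []
  simp only [List.nil_append, List.length_nil] at this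
  simp [this]
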